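-- pv_equiv track=rewrite | github.com/rgho/genetic_algo | travelling_salesman/merge.py | arePathsSane
-- ===== SOURCE A (Python) =====
-- def arePathsSane(paths):
--     chars = set()
--     for p in paths:
--         for c in p:
--             chars.add(c)
--     num_chars = sum(map(len, paths))
--     num_uniq = len(chars)
--     return num_chars == num_uniq
-- ===== SOURCE B (Python) =====
-- def arePathsSane(paths):
--     seen = set()
--     for p in paths:
--         for c in p:
--             if c in seen:
--                 return False
--             seen.add(c)
--     return True
-- ===== Notes on version B (the rewrite author's own statement) =====
-- stated objective: simpler
-- what changed: Single pass with an early return at the first duplicate character, instead of building the full character set and then comparing its size with the summed path lengths.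
import Mathlib
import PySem

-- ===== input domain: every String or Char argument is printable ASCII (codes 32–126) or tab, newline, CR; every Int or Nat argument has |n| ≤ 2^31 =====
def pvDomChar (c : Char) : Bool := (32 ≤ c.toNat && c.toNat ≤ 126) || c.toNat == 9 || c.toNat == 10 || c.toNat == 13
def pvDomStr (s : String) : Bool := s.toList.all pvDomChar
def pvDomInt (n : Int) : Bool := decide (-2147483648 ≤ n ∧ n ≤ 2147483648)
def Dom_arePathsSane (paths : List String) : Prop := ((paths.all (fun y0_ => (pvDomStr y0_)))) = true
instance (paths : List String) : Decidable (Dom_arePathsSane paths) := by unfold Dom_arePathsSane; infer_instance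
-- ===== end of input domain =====

-- B replaces "build the whole character set, then compare its size with the summed lengths"
-- by a single pass that returns False at the first repeated character (objective: simpler).

-- ===== PORT A =====
def arePathsSane (paths : List String) : Bool :=
  let chars : PySem.Set Char :=
    paths.foldl (fun s p => p.toList.foldl (fun s c => PySem.Set.add s c) s) PySem.Set.empty
  let num_chars : Int := (paths.map (fun p => PySem.Str.len p)).sum
  let num_uniq : Int := PySem.Set.len chars
  num_chars == num_uniq

-- ===== PORT B =====
-- inner loop of Source B: scan one path, none = early `return False`
def pvScanChars (seen : PySem.Set Char) : List Char → Option (PySem.Set Char)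
  | [] => some seen
  | c :: cs => if PySem.Set.contains seen c then none else pvScanChars (PySem.Set.add seen c) cs

-- outer loop of Source B over the paths
def pvScanPaths (seen : PySem.Set Char) : List String → Bool
  | [] => true
  | p :: ps =>
    match pvScanChars seen p.toList with
    | none => false
    | some seen' => pvScanPaths seen' ps

def arePathsSane_alt (paths : List String) : Bool :=
  pvScanPaths PySem.Set.empty paths

-- ===== PRECONDITION & SPEC =====
def Spec_arePathsSane (paths : List String) (out : Bool) : Prop := out = arePathsSane_alt paths
instance (paths : List String) (out : Bool) : Decidable (Spec_arePathsSane paths out) := by unfold Spec_arePathsSane; infer_instance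

-- ===== CLAIM (what is proved, stated in full; the proofs are below) =====
def Claim_equal_arePathsSane : Prop := ∀ (paths : List String), Dom_arePathsSane paths → Spec_arePathsSane paths (arePathsSane paths)

-- ===== LEMMAS AND PROOFS =====

-- the characters of all paths, in order
def pvFlat (paths : List String) : List Char := paths.flatMap String.toList

-- A's nested set-building fold is the fold over the flattened character list
theorem pvFoldA_eq_flat (paths : List String) (s : PySem.Set Char) :
    paths.foldl (fun s p => p.toList.foldl (fun s c => PySem.Set.add s c) s) s
      = (pvFlat paths).foldl PySem.Set.add s := by
  induction paths generalizing s with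
  | nil => rfl
  | cons p ps ih => simp [pvFlat, List.flatMap_cons, List.foldl_append, ih]

-- A's sum of lengths is the length of the flattened list
theorem pvSumLen_eq (paths : List String) :
    (paths.map (fun p => PySem.Str.len p)).sum = ((pvFlat paths).length : Int) := by
  induction paths with
  | nil => rfl
  | cons p ps ih =>
    rw [List.map_cons, List.sum_cons, ih, PySem.Str.len_eq]
    simp [pvFlat, List.flatMap_cons]

-- Set.ofList l is a sublist of l
theorem pvOfList_sublist (l : List Char) : (PySem.Set.ofList l).Sublist l := by
  induction l using List.reverseRecOn with
  | nil => simp [PySem.Set.ofList_eq_foldl]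
  | append_singleton l a ih =>
    rw [PySem.Set.ofList_eq_foldl] at *
    rw [List.foldl_append]
    show (PySem.Set.add _ a).Sublist _
    rw [PySem.Set.add]
    split
    · exact ih.trans (List.sublist_append_left l [a])
    · exact List.Sublist.append ih (List.Sublist.refl [a])

-- A returns true exactly when the flattened character list has no duplicate
theorem pvA_eq_nodup (paths : List String) :
    arePathsSane paths = decide (pvFlat paths).Nodup := by
  unfold arePathsSane
  rw [pvFoldA_eq_flat, show (PySem.Set.empty : PySem.Set Char) = [] from rfl,
    ← PySem.Set.ofList_eq_foldl, pvSumLen_eq]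
  show ((((pvFlat paths).length : Int)) == ((PySem.Set.ofList (pvFlat paths)).length : Int)) = _
  by_cases h : (pvFlat paths).Nodup
  · simp [h, PySem.Set.ofList_eq_self_of_nodup _ h]
  · simp only [h, decide_false, beq_eq_false_iff_ne, ne_eq]
    intro hlen
    exact h (((pvOfList_sublist (pvFlat paths)).eq_of_length (by exact_mod_cast hlen.symm)) ▸
      PySem.Set.nodup_ofList (pvFlat paths))

-- B's inner loop: from a duplicate-free seen set, it succeeds iff seen ++ cs is duplicate-free
theorem pvScanChars_eq (cs : List Char) (seen : PySem.Set Char) (h : seen.Nodup) :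
    pvScanChars seen cs = if (seen ++ cs).Nodup then some (seen ++ cs) else none := by
  induction cs generalizing seen with
  | nil => simp [pvScanChars, h]
  | cons c cs ih =>
    rw [pvScanChars, PySem.Set.contains_eq_decide]
    by_cases hc : c ∈ seen
    · have : ¬ (seen ++ c :: cs).Nodup := by
        intro hn
        exact (List.disjoint_of_nodup_append hn) hc List.mem_cons_self
      simp [hc, this]
    · have hadd : PySem.Set.add seen c = seen ++ [c] := by
        rw [PySem.Set.add, PySem.Set.contains_eq_decide]
        simp [hc]
      have hnd : (seen ++ [c]).Nodup := by
        simp only [List.nodup_append, List.nodup_cons, List.not_mem_nil, List.nodup_nil]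
        exact ⟨h, ⟨by simp, trivial⟩, fun a ha b hb => by simp at hb; exact fun he => hc ((he ▸ hb) ▸ ha)⟩
      simp only [hc, decide_false, Bool.false_eq_true, if_false, hadd, ih _ hnd,
        List.append_assoc, List.singleton_append]

-- B's outer loop: from a duplicate-free seen set, it answers whether seen ++ flat is duplicate-free
theorem pvScanPaths_eq (ps : List String) (seen : PySem.Set Char) (h : seen.Nodup) :
    pvScanPaths seen ps = decide ((seen ++ pvFlat ps).Nodup) := by
  induction ps generalizing seen with
  | nil => simp [pvScanPaths, pvFlat, h]
  | cons p ps ih =>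
    rw [pvScanPaths, pvScanChars_eq p.toList seen h]
    by_cases hnd : (seen ++ p.toList).Nodup
    · rw [if_pos hnd]
      simp only [ih _ hnd, pvFlat, List.flatMap_cons, List.append_assoc]
    · rw [if_neg hnd]
      have : ¬ (seen ++ pvFlat (p :: ps)).Nodup := by
        intro hn
        exact hnd (hn.sublist (List.Sublist.append (List.Sublist.refl seen)
          (by simp [pvFlat, List.flatMap_cons])))
      simp [this]

theorem pvB_eq_nodup (paths : List String) :
    arePathsSane_alt paths = decide (pvFlat paths).Nodup := by
  unfold arePathsSane_alt
  rw [pvScanPaths_eq paths PySem.Set.empty List.nodup_nil]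
  rfl

-- ===== VERDICT (by name: the statement is the Claim_ definition above) =====
theorem arePathsSane_spec : Claim_equal_arePathsSane := by
  intro paths _
  unfold Spec_arePathsSane
  rw [pvA_eq_nodup, pvB_eq_nodup]
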